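-- pv_equiv track=rewrite | github.com/Rohini58/CP-Practice | 05-nthwithproperty309-Python/nthwithproperty309.py | property309
-- ===== SOURCE A (Python) =====
-- def property309(n):
--     n=pow(n,5)
--     m=[]
--     while(n):
--         rem=n%10
--         m.append(rem)
--         n=n//10
--     x=[0,1,2,3,4,5,6,7,8,9]
--     for i in x:
--         if(i not in m):
--             return False
--     return True
-- ===== SOURCE B (Python) =====
-- def property309(n):
--     return set(str(pow(n, 5))) >= set('0123456789')
-- ===== Notes on version B (the rewrite author's own statement) =====
-- stated objective: idiomatic
-- what changed: Replaces A's manual modulo/floor-division digit-extraction loop plus its ten-iteration membership loop with a single set-superset comparison of the characters of str(n**5) against set('0123456789').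
import Mathlib
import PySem

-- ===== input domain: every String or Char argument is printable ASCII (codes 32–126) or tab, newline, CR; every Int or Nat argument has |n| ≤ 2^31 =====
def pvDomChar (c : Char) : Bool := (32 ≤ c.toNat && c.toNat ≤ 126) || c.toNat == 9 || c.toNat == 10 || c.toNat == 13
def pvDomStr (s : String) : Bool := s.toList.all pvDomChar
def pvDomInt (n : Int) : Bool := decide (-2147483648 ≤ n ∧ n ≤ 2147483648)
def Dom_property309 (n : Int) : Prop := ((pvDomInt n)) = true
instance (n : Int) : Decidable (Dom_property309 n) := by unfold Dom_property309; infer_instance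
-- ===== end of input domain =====

-- B replaces A's modulo digit-extraction loop and ten-iteration membership loop by one
-- set-superset comparison over the characters of str(n**5) (idiomatic; same cost).


-- ===== PORT A =====
-- the 'while(n):' digit loop of A; the guard 0 < n makes it total — Python's loop
-- never terminates for negative n (excluded by Pre_) and does not run for n = 0
def pvDigitsA (n : Int) : List Int :=
  if _h : 0 < n then PySem.Int.mod n 10 :: pvDigitsA (PySem.Int.floordiv n 10)
  else []
termination_by n.toNat
decreasing_by
  have h10 : PySem.Int.floordiv n 10 = n / 10 :=
    PySem.Int.floordiv_eq_ediv_of_pos (by norm_num)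
  rw [h10]; omega

def property309 (n : Int) : Bool :=
  let m := pvDigitsA (n ^ 5)
  ([0, 1, 2, 3, 4, 5, 6, 7, 8, 9] : List Int).all (fun i => m.contains i)

-- ===== PORT B =====
def property309_alt (n : Int) : Bool :=
  PySem.Set.issuperset (PySem.Set.ofList (PySem.Int.toStr (n ^ 5)).toList)
    (PySem.Set.ofList "0123456789".toList)

-- ===== PRECONDITION & SPEC =====
-- Pre_ excludes negative n, on which A's while loop never terminates (n//10 of a
-- negative number stabilises at -1), so A returns no value there.
def Pre_property309 (n : Int) : Prop := 0 ≤ n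
instance (n : Int) : Decidable (Pre_property309 n) := by unfold Pre_property309; infer_instance

def pvWitness_property309 : Int := (309)

def Spec_property309 (n : Int) (out : Bool) : Prop := out = property309_alt n
instance (n : Int) (out : Bool) : Decidable (Spec_property309 n out) := by unfold Spec_property309; infer_instance

-- ===== CLAIM (what is proved, stated in full; the proofs are below) =====
def Claim_equal_property309 : Prop := ∀ (n : Int), Dom_property309 n → Pre_property309 n → Spec_property309 n (property309 n)

-- ===== LEMMAS AND PROOFS =====

-- A's digit list is the little-endian decimal digit list
theorem pvDigitsA_natCast (m : Nat) :
    pvDigitsA (m : Int) = (Nat.digits 10 m).map (fun d : Nat => (d : Int)) := by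
  induction m using Nat.strong_induction_on with
  | _ m ih =>
    rw [pvDigitsA]
    by_cases hm : 0 < m
    · rw [dif_pos (by exact_mod_cast hm)]
      have hmod : PySem.Int.mod (m : Int) 10 = ((m % 10 : Nat) : Int) := by
        exact_mod_cast PySem.Int.mod_natCast m 10
      have hdiv : PySem.Int.floordiv (m : Int) 10 = ((m / 10 : Nat) : Int) := by
        exact_mod_cast PySem.Int.floordiv_natCast m 10
      rw [hmod, hdiv, ih (m / 10) (Nat.div_lt_self hm (by norm_num)),
        Nat.digits_def' (by norm_num : 1 < 10) hm]
      simp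
    · have : m = 0 := by omega
      subst this; simp

theorem toDigitsCore_eq (n : Nat) : ∀ (f : Nat) (acc : List Char), 0 < n → n < f →
    Nat.toDigitsCore 10 f n acc = ((Nat.digits 10 n).map Nat.digitChar).reverse ++ acc := by
  induction n using Nat.strong_induction_on with
  | _ n ih =>
    intro f acc hn hf
    match f with
    | 0 => omega
    | f + 1 =>
      have hstep : Nat.toDigitsCore 10 (f + 1) n acc =
          if n / 10 = 0 then (n % 10).digitChar :: acc
          else Nat.toDigitsCore 10 f (n / 10) ((n % 10).digitChar :: acc) := rfl
      rw [hstep]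
      by_cases hq : n / 10 = 0
      · rw [if_pos hq, Nat.digits_def' (by norm_num : 1 < 10) hn, hq]
        simp
      · rw [if_neg hq]
        have hqpos : 0 < n / 10 := Nat.pos_of_ne_zero hq
        have hlt : n / 10 < n := Nat.div_lt_self hn (by norm_num)
        rw [ih (n / 10) hlt f _ hqpos (by omega),
          Nat.digits_def' (by norm_num : 1 < 10) hn]
        simp

theorem toChars_natCast (m : Nat) (hm : 0 < m) :
    PySem.Int.toChars (m : Int) = ((Nat.digits 10 m).map Nat.digitChar).reverse := by
  rw [PySem.Int.toChars, if_neg (by omega)]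
  have h1 : (m : Int).toNat = m := rfl
  rw [h1, Nat.toDigits, toDigitsCore_eq m (m + 1) [] hm (by omega)]
  simp

theorem digitChar_inj (d i : Nat) (hd : d < 10) (hi : i < 10) :
    Nat.digitChar d = Nat.digitChar i ↔ d = i := by
  interval_cases d <;> interval_cases i <;> decide

-- membership bridge: digit i occurs in A's list iff its character occurs in str(n^5)
theorem mem_bridge (N i : Nat) (hN : 0 < N) (hi : i < 10) :
    ((i : Int) ∈ pvDigitsA (N : Int) ↔ Nat.digitChar i ∈ PySem.Int.toChars (N : Int)) := by
  rw [pvDigitsA_natCast, toChars_natCast N hN, List.mem_reverse, List.mem_map, List.mem_map]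
  constructor
  · rintro ⟨d, hd, hc⟩
    have hdi : d = i := by exact_mod_cast hc
    subst hdi; exact ⟨d, hd, rfl⟩
  · rintro ⟨d, hd, hc⟩
    have hdi : d = i := (digitChar_inj d i (Nat.digits_lt_base (by norm_num) hd) hi).mp hc
    subst hdi; exact ⟨d, hd, rfl⟩

-- ===== VERDICT (by name: the statement is the Claim_ definition above) =====
theorem property309_spec : Claim_equal_property309 := by
  intro n _ hpre
  unfold Spec_property309
  by_cases h0 : n = 0
  · subst h0
    have hA : property309 (0 : Int) = false := by
      unfold property309
      rw [pvDigitsA]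
      norm_num
    have hB : property309_alt (0 : Int) = false := by decide
    rw [hA, hB]
  · have hn : 0 < n := lt_of_le_of_ne hpre (Ne.symm h0)
    have hpow : 0 < n ^ 5 := pow_pos hn 5
    set N : Nat := (n ^ 5).toNat with hN
    have hcast : (n ^ 5) = (N : Int) := by omega
    have hNpos : 0 < N := by omega
    rw [Bool.eq_iff_iff]
    unfold property309 property309_alt
    rw [hcast, PySem.Set.issuperset_iff]
    simp only [List.all_eq_true, List.contains_iff_mem]
    have hten : "0123456789".toList = ['0','1','2','3','4','5','6','7','8','9'] := rfl
    constructor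
    · intro hall c hc
      rw [PySem.Set.mem_ofList, hten] at hc
      rw [PySem.Set.mem_ofList, PySem.Int.toList_toStr]
      have hex : ∃ i : Nat, i < 10 ∧ c = Nat.digitChar i := by
        fin_cases hc
        · exact ⟨0, by norm_num, rfl⟩
        · exact ⟨1, by norm_num, rfl⟩
        · exact ⟨2, by norm_num, rfl⟩
        · exact ⟨3, by norm_num, rfl⟩
        · exact ⟨4, by norm_num, rfl⟩
        · exact ⟨5, by norm_num, rfl⟩
        · exact ⟨6, by norm_num, rfl⟩
        · exact ⟨7, by norm_num, rfl⟩
        · exact ⟨8, by norm_num, rfl⟩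
        · exact ⟨9, by norm_num, rfl⟩
      obtain ⟨i, hilt, rfl⟩ := hex
      rw [← mem_bridge N i hNpos hilt]
      apply hall
      interval_cases i <;> decide
    · intro hall i hi
      have hiN : ∃ j : Nat, j < 10 ∧ i = (j : Int) := by
        fin_cases hi
        · exact ⟨0, by norm_num, rfl⟩
        · exact ⟨1, by norm_num, rfl⟩
        · exact ⟨2, by norm_num, rfl⟩
        · exact ⟨3, by norm_num, rfl⟩
        · exact ⟨4, by norm_num, rfl⟩
        · exact ⟨5, by norm_num, rfl⟩
        · exact ⟨6, by norm_num, rfl⟩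
        · exact ⟨7, by norm_num, rfl⟩
        · exact ⟨8, by norm_num, rfl⟩
        · exact ⟨9, by norm_num, rfl⟩
      obtain ⟨j, hj, rfl⟩ := hiN
      rw [mem_bridge N j hNpos hj]
      have h1 : Nat.digitChar j ∈ PySem.Set.ofList (PySem.Int.toStr (N : Int)).toList := by
        apply hall
        rw [PySem.Set.mem_ofList, hten]
        interval_cases j <;> decide
      rw [PySem.Set.mem_ofList, PySem.Int.toList_toStr] at h1
      exact h1
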